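-- pv_equiv track=rewrite | github.com/SebastianVintonuke/TDA-Test | DivisionYConquista/max_subarray.py | max_desde_hasta
-- ===== SOURCE A (Python) =====
-- def max_desde_hasta(arr, inicio, fin, paso):
--     sumatoria = arr[inicio]
--     max_sumatoria = arr[inicio]
--     indice_max_sumatoria = inicio
--     for indice in range(inicio + paso, fin + paso, paso):
--         sumatoria += arr[indice]
--         if sumatoria > max_sumatoria:
--             max_sumatoria = sumatoria
--             indice_max_sumatoria = indice
--     return (indice_max_sumatoria, max_sumatoria)
-- ===== SOURCE B (Python) =====
-- def max_desde_hasta(arr, inicio, fin, paso):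
--     # Two-pass decomposition: build the stepped index list and its prefix-sum
--     # table, then a separate strict-'>' argmax scan over the table.
--     indices = [inicio] + list(range(inicio + paso, fin + paso, paso))
--     prefijos = []
--     total = 0
--     for i in indices:
--         total += arr[i]
--         prefijos.append(total)
--     mejor_pos = 0
--     mejor_val = prefijos[0]
--     for pos, val in enumerate(prefijos):
--         if val > mejor_val:
--             mejor_pos = pos
--             mejor_val = val
--     return (indices[mejor_pos], mejor_val)
-- ===== Notes on version B (the rewrite author's own statement) =====
-- stated objective: alternative
-- what changed: A's single fused loop (running sum + running max + best index in one pass) is replaced by a two-phase decomposition: first materialise the stepped index list and its prefix-sum table, then a separate strict-'>' argmax scan over the table, mapping the winning position back through the index list.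
import Mathlib
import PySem

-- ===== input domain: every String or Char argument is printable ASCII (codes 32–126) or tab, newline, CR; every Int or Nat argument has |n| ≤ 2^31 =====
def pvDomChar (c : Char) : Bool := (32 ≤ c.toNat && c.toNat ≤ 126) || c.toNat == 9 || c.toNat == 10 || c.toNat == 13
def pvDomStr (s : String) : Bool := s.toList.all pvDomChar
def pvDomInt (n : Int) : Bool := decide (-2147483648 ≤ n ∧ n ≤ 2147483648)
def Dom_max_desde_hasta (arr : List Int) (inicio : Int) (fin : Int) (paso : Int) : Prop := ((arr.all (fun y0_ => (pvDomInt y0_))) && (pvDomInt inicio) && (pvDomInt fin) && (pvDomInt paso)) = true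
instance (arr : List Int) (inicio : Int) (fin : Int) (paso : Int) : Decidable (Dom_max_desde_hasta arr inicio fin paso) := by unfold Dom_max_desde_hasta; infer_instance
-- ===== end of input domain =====

-- B replaces A's single fused loop by a two-phase decomposition (prefix-sum table, then a
-- separate strict-'>' argmax scan mapped back through the index list); same cost, alternative shape.

-- ===== PORT A =====
-- loop body of A's single fused pass: state (sumatoria, max_sumatoria, indice_max_sumatoria)
def stepA (arr : List Int) (st : Int × Int × Int) (indice : Int) : Int × Int × Int :=
  let sumatoria := st.1 + PySem.List.pyGetD arr indice 0
  if sumatoria > st.2.1 then (sumatoria, sumatoria, indice) else (sumatoria, st.2.1, st.2.2)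

def max_desde_hasta (arr : List Int) (inicio : Int) (fin : Int) (paso : Int) : Int × Int :=
  let sumatoria := PySem.List.pyGetD arr inicio 0
  let st := (PySem.List.pyRange (inicio + paso) (fin + paso) paso).foldl (stepA arr)
              (sumatoria, sumatoria, inicio)
  (st.2.2, st.2.1)

-- ===== PORT B =====
-- loop body of B's first pass: state (prefijos, total)
def stepPref (st : List Int × Int) (v : Int) : List Int × Int :=
  let total := st.2 + v
  (st.1 ++ [total], total)

-- loop body of B's second pass (argmax over (pos, val) pairs): state (mejor_pos, mejor_val)
def stepBest (st : Int × Int) (pv : Int × Int) : Int × Int :=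
  if pv.2 > st.2 then (pv.1, pv.2) else st

def max_desde_hasta_alt (arr : List Int) (inicio : Int) (fin : Int) (paso : Int) : Int × Int :=
  let indices := inicio :: PySem.List.pyRange (inicio + paso) (fin + paso) paso
  let prefijos := (indices.foldl (fun st i => stepPref st (PySem.List.pyGetD arr i 0)) ([], 0)).1
  let best := (PySem.List.enumerate prefijos 0).foldl stepBest (0, PySem.List.pyGetD prefijos 0 0)
  (PySem.List.pyGetD indices best.1 0, best.2)

-- ===== PRECONDITION & SPEC =====
-- Pre_ = exactly the inputs where Python A returns: paso ≠ 0 (else range raises ValueError) and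
-- every accessed index (inicio and each index of the stepped range) is a valid Python index of arr.
def Pre_max_desde_hasta (arr : List Int) (inicio : Int) (fin : Int) (paso : Int) : Prop :=
  paso ≠ 0 ∧
    ∀ i ∈ inicio :: PySem.List.pyRange (inicio + paso) (fin + paso) paso,
      PySem.Raise.InRange arr.length i
instance (arr : List Int) (inicio : Int) (fin : Int) (paso : Int) : Decidable (Pre_max_desde_hasta arr inicio fin paso) := by unfold Pre_max_desde_hasta; infer_instance

def pvWitness_max_desde_hasta : List Int × Int × Int × Int := ([1, -2, 3], 0, 2, 1)

def Spec_max_desde_hasta (arr : List Int) (inicio : Int) (fin : Int) (paso : Int) (out : Int × Int) : Prop := out = max_desde_hasta_alt arr inicio fin paso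
instance (arr : List Int) (inicio : Int) (fin : Int) (paso : Int) (out : Int × Int) : Decidable (Spec_max_desde_hasta arr inicio fin paso out) := by unfold Spec_max_desde_hasta; infer_instance

-- ===== CLAIM (what is proved, stated in full; the proofs are below) =====
def Claim_equal_max_desde_hasta : Prop := ∀ (arr : List Int) (inicio : Int) (fin : Int) (paso : Int), Dom_max_desde_hasta arr inicio fin paso → Pre_max_desde_hasta arr inicio fin paso → Spec_max_desde_hasta arr inicio fin paso (max_desde_hasta arr inicio fin paso)

-- ===== LEMMAS AND PROOFS =====

-- prefix-sum table as a recursion (proof-side characterisation of B's first pass)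
def scan1 (s : Int) : List Int → List Int
  | [] => []
  | v :: t => (s + v) :: scan1 (s + v) t

theorem pref_build (arr : List Int) (idxs : List Int) : ∀ (acc : List Int) (s : Int),
    (idxs.foldl (fun st i => stepPref st (PySem.List.pyGetD arr i 0)) (acc, s)).1
      = acc ++ scan1 s (idxs.map fun i => PySem.List.pyGetD arr i 0) := by
  induction idxs with
  | nil => intro acc s; simp [scan1]
  | cons i t ih =>
      intro acc s
      rw [List.foldl_cons,
          show stepPref (acc, s) (PySem.List.pyGetD arr i 0)
              = (acc ++ [s + PySem.List.pyGetD arr i 0], s + PySem.List.pyGetD arr i 0) from rfl,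
          ih]
      simp [scan1]

theorem bridge (arr I : List Int) (rs : List Int) : ∀ (k s m mp j : Int),
    (∀ t : Nat, t < rs.length → PySem.List.pyGetD I (k + (t : Int)) 0 = rs.getD t 0) →
    PySem.List.pyGetD I mp 0 = j →
    (fun b => (PySem.List.pyGetD I b.1 0, b.2))
        ((PySem.List.enumerate (scan1 s (rs.map fun i => PySem.List.pyGetD arr i 0)) k).foldl
          stepBest (mp, m))
      = (fun a => (a.2.2, a.2.1)) (rs.foldl (stepA arr) (s, m, j)) := by
  induction rs with
  | nil =>
      intro k s m mp j _ hj
      simp [scan1, PySem.List.enumerate_nil, hj]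
  | cons i t ih =>
      intro k s m mp j hidx hj
      simp only [List.map_cons, scan1, PySem.List.enumerate_cons, List.foldl_cons]
      have h0 : PySem.List.pyGetD I k 0 = i := by
        have := hidx 0 (by simp)
        simpa using this
      have hshift : ∀ t' : Nat, t' < t.length →
          PySem.List.pyGetD I (k + 1 + (t' : Int)) 0 = t.getD t' 0 := by
        intro t' ht'
        have := hidx (t' + 1) (by simp; omega)
        have harg : k + ((t' + 1 : Nat) : Int) = k + 1 + (t' : Int) := by push_cast; ring
        rw [harg] at this
        simpa using this
      by_cases hc : s + PySem.List.pyGetD arr i 0 > m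
      · rw [show stepBest (mp, m) (k, s + PySem.List.pyGetD arr i 0)
              = (k, s + PySem.List.pyGetD arr i 0) by simp [stepBest, hc],
           show stepA arr (s, m, j) i
              = (s + PySem.List.pyGetD arr i 0, s + PySem.List.pyGetD arr i 0, i) by
                simp [stepA, hc]]
        exact ih (k + 1) (s + PySem.List.pyGetD arr i 0) (s + PySem.List.pyGetD arr i 0) k i
          hshift h0
      · rw [show stepBest (mp, m) (k, s + PySem.List.pyGetD arr i 0) = (mp, m) by
              simp [stepBest]; omega,
           show stepA arr (s, m, j) i = (s + PySem.List.pyGetD arr i 0, m, j) by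
              simp [stepA]; omega]
        exact ih (k + 1) (s + PySem.List.pyGetD arr i 0) m mp j hshift hj

-- ===== VERDICT (by name: the statement is the Claim_ definition above) =====
theorem max_desde_hasta_spec : Claim_equal_max_desde_hasta := by
  intro arr inicio fin paso _ _
  unfold Spec_max_desde_hasta max_desde_hasta max_desde_hasta_alt
  set rng := PySem.List.pyRange (inicio + paso) (fin + paso) paso with hrng
  simp only []
  set f : Int → Int := fun i => PySem.List.pyGetD arr i 0 with hf
  have hpref : ((inicio :: rng).foldl (fun st i => stepPref st (PySem.List.pyGetD arr i 0))
      ([], 0)).1 = f inicio :: scan1 (f inicio) (rng.map f) := by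
    rw [pref_build]
    simp [scan1, hf]
  rw [hpref]
  rw [show PySem.List.pyGetD (f inicio :: scan1 (f inicio) (rng.map f)) 0 0 = f inicio from
        PySem.List.pyGetD_zero_cons _ _ _]
  rw [PySem.List.enumerate_cons, List.foldl_cons,
      show stepBest (0, f inicio) (0, f inicio) = (0, f inicio) by simp [stepBest]]
  have hidx : ∀ t : Nat, t < rng.length →
      PySem.List.pyGetD (inicio :: rng) ((0 : Int) + 1 + (t : Int)) 0 = rng.getD t 0 := by
    intro t ht
    have harg : (0 : Int) + 1 + (t : Int) = ((t + 1 : Nat) : Int) := by push_cast; ring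
    rw [harg, PySem.List.pyGetD_natCast]
    simp [List.getD]
  have hj : PySem.List.pyGetD (inicio :: rng) (0 : Int) 0 = inicio := by
    exact PySem.List.pyGetD_zero_cons inicio rng 0
  have := bridge arr (inicio :: rng) rng (0 + 1) (f inicio) (f inicio) 0 inicio
    (by simpa using hidx) hj
  simp only [hf] at this
  refine Eq.symm ?_
  simpa using this
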